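-- pv_equiv track=rewrite | github.com/Diego-Roque/Algoritmos | codeforces/append_and_panic.py | find_original_length
-- ===== SOURCE A (Python) =====
-- def find_original_length(S):
--     # Set to store the unique characters
--     seen = set()
--     unique_length = 0
--
--     # Traverse from the end to find the sorted, duplicate-free version
--     for i in range(len(S) - 1, -1, -1):
--         if S[i] not in seen:
--             seen.add(S[i])
--             unique_length += 1
--         else:
--             break
--
--     # The length of the original string t is the total length minus the length of the sorted unique part
--     return len(S) - unique_length
-- ===== SOURCE B (Python) =====
-- def find_original_length(S):
--     # forward scan: answer is 1 + the last index whose character recurs later, else 0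
--     ans = 0
--     for i, c in enumerate(S):
--         if c in S[i+1:]:
--             ans = i + 1
--     return ans
-- ===== Notes on version B (the rewrite author's own statement) =====
-- stated objective: alternative
-- what changed: Replaces A's backward scan that grows a seen-set until the first repeated character with a forward scan that keeps 1 + the last index whose character occurs again later in the string.
import Mathlib
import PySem

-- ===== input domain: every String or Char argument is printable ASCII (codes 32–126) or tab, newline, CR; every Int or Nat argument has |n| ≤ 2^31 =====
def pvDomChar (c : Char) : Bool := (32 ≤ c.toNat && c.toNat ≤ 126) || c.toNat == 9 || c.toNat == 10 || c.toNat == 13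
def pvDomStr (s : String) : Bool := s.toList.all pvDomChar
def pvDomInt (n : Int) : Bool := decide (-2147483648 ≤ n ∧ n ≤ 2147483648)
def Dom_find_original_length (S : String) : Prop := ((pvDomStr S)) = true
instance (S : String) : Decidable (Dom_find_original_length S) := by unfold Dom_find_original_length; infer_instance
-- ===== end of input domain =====

-- B replaces A's backward scan-with-a-seen-set by a forward scan keeping 1 + the last index
-- whose character recurs later in the string (alternative decomposition, same return value).


-- ===== PORT A =====
-- the 'for i in range(len(S)-1, -1, -1)' loop with its break, over the remaining index list;
-- S[i] is ported as pyGetD (every generated index is in range, so Python never raises here)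
def pvALoop (cs : List Char) : List Int → PySem.Set Char → Int → Int
  | [], _, ul => ul
  | i :: rest, seen, ul =>
    let c := PySem.List.pyGetD cs i ' '
    if PySem.Set.contains seen c then ul
    else pvALoop cs rest (PySem.Set.add seen c) (ul + 1)

def find_original_length (S : String) : Int :=
  let cs := S.toList
  let unique_length :=
    pvALoop cs (PySem.List.pyRange (PySem.Str.len S - 1) (-1) (-1)) PySem.Set.empty 0
  PySem.Str.len S - unique_length

-- ===== PORT B =====
-- 'c in S[i+1:]' : for the single character c this substring test is char membership in the slice
def find_original_length_alt (S : String) : Int :=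
  let cs := S.toList
  (PySem.List.enumerate cs 0).foldl
    (fun ans ic =>
      if ic.2 ∈ PySem.List.slice cs (some (ic.1 + 1)) none then ic.1 + 1 else ans) 0

-- ===== PRECONDITION & SPEC =====
def Spec_find_original_length (S : String) (out : Int) : Prop := out = find_original_length_alt S
instance (S : String) (out : Int) : Decidable (Spec_find_original_length S out) := by unfold Spec_find_original_length; infer_instance

-- ===== CLAIM (what is proved, stated in full; the proofs are below) =====
def Claim_equal_find_original_length : Prop := ∀ (S : String), Dom_find_original_length S → Spec_find_original_length S (find_original_length S)

-- ===== LEMMAS AND PROOFS =====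

-- the distinct-prefix counter underlying A's loop, on the reversed char list
def pvCount (r : List Char) (seen : PySem.Set Char) : Nat :=
  match r with
  | [] => 0
  | c :: rest => if c ∈ seen then 0 else pvCount rest (PySem.Set.add seen c) + 1

lemma pvALoop_shift (cs : List Char) (idx : List Int) (seen : PySem.Set Char) (ul : Int) :
    pvALoop cs idx seen ul = ul + pvALoop cs idx seen 0 := by
  induction idx generalizing seen ul with
  | nil => simp [pvALoop]
  | cons i rest ih =>
    simp only [pvALoop]
    split
    · simp
    · rw [ih _ (ul + 1), ih _ (0 + 1)]; ring

lemma pvALoop_eq_count (cs : List Char) :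
    ∀ (m : Nat), m ≤ cs.length → ∀ seen,
      pvALoop cs (PySem.List.pyRange ((m : Int) - 1) (-1) (-1)) seen 0
        = ((pvCount ((cs.take m).reverse) seen : Nat) : Int) := by
  intro m
  induction m with
  | zero =>
    intro _ seen
    rw [show ((0 : Nat) : Int) - 1 = -1 by norm_num,
        PySem.List.pyRange_neg_one_eq_nil le_rfl]
    simp [pvALoop, pvCount]
  | succ m ih =>
    intro hm seen
    have hm' : m < cs.length := by omega
    rw [show ((m + 1 : Nat) : Int) - 1 = (m : Int) by push_cast; ring,
        PySem.List.pyRange_neg_one_cons (by omega)]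
    simp only [pvALoop, PySem.List.pyGetD_natCast]
    have hget : cs.getD m ' ' = cs[m] := List.getD_eq_getElem cs ' ' hm'
    have htake : (cs.take (m + 1)).reverse = cs[m] :: (cs.take m).reverse := by
      rw [List.take_add_one, List.getElem?_eq_getElem hm']
      simp
    rw [htake, hget]
    simp only [pvCount]
    by_cases hmem : cs[m] ∈ seen
    · rw [if_pos ((PySem.Set.contains_iff seen _).mpr hmem), if_pos hmem]
      rfl
    · rw [if_neg (by simp [hmem]), if_neg hmem]
      rw [pvALoop_shift, ih (by omega) (PySem.Set.add seen cs[m])]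
      push_cast; ring

lemma pvCount_le (r : List Char) (seen : PySem.Set Char) : pvCount r seen ≤ r.length := by
  induction r generalizing seen with
  | nil => simp [pvCount]
  | cons c rest ih =>
    simp only [pvCount]
    split
    · simp
    · simpa using Nat.succ_le_succ (ih _)

lemma pvCount_distinct (r : List Char) (seen : PySem.Set Char) :
    ∀ j (_hj : j < pvCount r seen) (hjl : j < r.length), r[j] ∉ seen ∧ r[j] ∉ r.take j := by
  induction r generalizing seen with
  | nil => intro j hj hjl; simp [pvCount] at hj
  | cons c rest ih =>
    intro j hj hjl
    simp only [pvCount] at hj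
    split at hj
    · omega
    · rename_i hcs
      match j with
      | 0 => simpa using hcs
      | Nat.succ j =>
        have hj' : j < pvCount rest (PySem.Set.add seen c) := by omega
        have hjl' : j < rest.length := by simpa using hjl
        obtain ⟨h1, h2⟩ := ih (PySem.Set.add seen c) j hj' hjl'
        rw [PySem.Set.mem_add] at h1
        push Not at h1
        refine ⟨?_, ?_⟩
        · simpa using h1.1
        · simp only [List.take_succ_cons, List.getElem_cons_succ, List.mem_cons]
          push Not
          exact ⟨h1.2, h2⟩

lemma pvCount_break (r : List Char) (seen : PySem.Set Char)
    (h : pvCount r seen < r.length) :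
    r[pvCount r seen]'h ∈ seen ∨ r[pvCount r seen]'h ∈ r.take (pvCount r seen) := by
  induction r generalizing seen with
  | nil => simp at h
  | cons c rest ih =>
    simp only [pvCount] at h ⊢
    split at h <;> split
    · simp_all
    · simp_all
    · simp_all
    · rename_i hcs hcs2
      have h' : pvCount rest (PySem.Set.add seen c) < rest.length := by
        simpa using h
      have := ih (PySem.Set.add seen c) h'
      rw [PySem.Set.mem_add] at this
      simp only [List.getElem_cons_succ, List.take_succ_cons, List.mem_cons]
      tauto

-- B's fold over enumerate, rewritten as a fold over List.range
def pvP (cs : List Char) (k : Nat) : Bool := decide (cs.getD k ' ' ∈ cs.drop (k + 1))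

lemma pvB_eq_range_fold (S : String) :
    find_original_length_alt S =
      (List.range S.toList.length).foldl
        (fun ans k => if pvP S.toList k then ((k : Int) + 1) else ans) 0 := by
  show List.foldl _ 0 (PySem.List.enumerate S.toList) = _
  rw [PySem.List.enumerate_eq_map_pyRange S.toList ' ', List.foldl_map]
  rw [show PySem.List.len S.toList = ((S.toList.length : Nat) : Int) by
        simp [PySem.List.len],
      PySem.List.pyRange_zero_natCast, List.foldl_map]
  congr 1
  funext ans k
  simp only [pvP, PySem.List.pyGetD_natCast]
  rw [show ((k : Int) + 1) = ((k + 1 : Nat) : Int) by push_cast; ring,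
      PySem.List.slice_from_natCast]
  simp

lemma pv_fold_stable (cs : List Char) (m : Nat) :
    ∀ N, m ≤ N → (∀ k, m ≤ k → k < N → pvP cs k = false) →
      (List.range N).foldl (fun ans k => if pvP cs k then ((k : Int) + 1) else ans) 0
        = (List.range m).foldl (fun ans k => if pvP cs k then ((k : Int) + 1) else ans) 0 := by
  intro N
  induction N with
  | zero => intro h _; have : m = 0 := by omega
            subst this; rfl
  | succ N ih =>
    intro hmN hfalse
    rcases Nat.lt_or_ge m (N + 1) with hlt | hge
    · have hm : m ≤ N := by omega
      rw [List.range_succ, List.foldl_append]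
      simp only [List.foldl_cons, List.foldl_nil]
      rw [hfalse N hm (by omega)]
      exact ih hm (fun k hk1 hk2 => hfalse k hk1 (by omega))
    · have : m = N + 1 := by omega
      subst this; rfl

lemma pvP_iff (cs : List Char) (j : Nat) (hj : j < cs.length) :
    pvP cs (cs.length - 1 - j) = true ↔
      cs.reverse[j]'(by simpa using hj) ∈ cs.reverse.take j := by
  have hk : cs.length - 1 - j < cs.length := by omega
  have h1 : cs.getD (cs.length - 1 - j) ' ' = cs[cs.length - 1 - j] :=
    List.getD_eq_getElem cs ' ' hk
  have h2 : cs.reverse[j]'(by simpa using hj) = cs[cs.length - 1 - j] :=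
    List.getElem_reverse _
  have h3 : cs.reverse.take j = (cs.drop (cs.length - j)).reverse := List.take_reverse
  have h4 : cs.length - j = cs.length - 1 - j + 1 := by omega
  rw [h3, h4]
  simp [pvP, List.getElem?_eq_getElem hk, h2]

-- ===== VERDICT (by name: the statement is the Claim_ definition above) =====
theorem find_original_length_spec : Claim_equal_find_original_length := by
  intro S _
  unfold Spec_find_original_length
  have hA : find_original_length S =
      ((S.toList.length : Nat) : Int)
        - (pvCount S.toList.reverse PySem.Set.empty : Nat) := by
    show PySem.Str.len S - pvALoop S.toList
        (PySem.List.pyRange (PySem.Str.len S - 1) (-1) (-1)) PySem.Set.empty 0 = _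
    rw [PySem.Str.len_eq, pvALoop_eq_count S.toList S.toList.length le_rfl,
        List.take_length]
  set cs := S.toList with hcs
  set n := cs.length with hn
  set rs := cs.reverse with hrs
  set d := pvCount rs PySem.Set.empty with hd
  have hdle : d ≤ n := by
    have := pvCount_le rs PySem.Set.empty
    simpa [hrs] using this
  have hfalse : ∀ k, n - d ≤ k → k < n → pvP cs k = false := by
    intro k h1 h2
    have hj : n - 1 - k < n := by omega
    have hjd : n - 1 - k < d := by omega
    have hk' : k = n - 1 - (n - 1 - k) := by omega
    obtain ⟨-, hnot⟩ := pvCount_distinct rs PySem.Set.empty (n - 1 - k)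
      (by simpa [hd] using hjd) (by simpa [hrs] using hj)
    rw [hk']
    rw [Bool.eq_false_iff]
    intro htrue
    exact hnot ((pvP_iff cs (n - 1 - k) hj).mp htrue)
  rw [hA, pvB_eq_range_fold,
      pv_fold_stable cs (n - d) n (by omega) hfalse]
  by_cases hdn : d < n
  · have hm : n - d = (n - d - 1) + 1 := by omega
    rw [hm, List.range_succ, List.foldl_append]
    have hjd : d < rs.length := by simpa [hrs] using hdn
    have hbreak := pvCount_break rs PySem.Set.empty hjd
    have htake : rs[d]'hjd ∈ rs.take d := by
      rcases hbreak with h | h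
      · simp [PySem.Set.empty] at h
      · exact h
    have htrue : pvP cs (n - d - 1) = true := by
      have := (pvP_iff cs d (by omega)).mpr htake
      have he : n - 1 - d = n - d - 1 := by omega
      rwa [he] at this
    simp only [List.foldl_cons, List.foldl_nil, htrue, if_pos]
    omega
  · have hdn' : d = n := by omega
    rw [show n - d = 0 by omega]
    simp only [List.range_zero, List.foldl_nil]
    omega
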